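-- pv_equiv track=rewrite | github.com/ecoding-dev/QR-Generator-Advanced | penalties.py | penalty_N3
-- ===== SOURCE A (Python) =====
-- def _pattern_1_1_3_1_1(seq):
--     idxs = []
--     n = len(seq)
--     pat = [1,0,1,1,1,0,1]
--     for i in range(n - 7 + 1):
--         if seq[i:i+7] == pat:
--             left_ok = (i >= 4 and all(v == 0 for v in seq[i-4:i]))
--             right_ok = (i+7 <= n-4 and all(v == 0 for v in seq[i+7:i+11]))
--             if left_ok or right_ok:
--                 idxs.append(i)
--     return idxs
--
-- def penalty_N3(rows):
--     score = 0
--     n = len(rows)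
--     for r in range(n):
--         row = [1 if rows[r][c] else 0 for c in range(n)]
--         score += 40 * len(_pattern_1_1_3_1_1(row))
--     for c in range(n):
--         col = [1 if rows[r][c] else 0 for r in range(n)]
--         score += 40 * len(_pattern_1_1_3_1_1(col))
--     return score
-- ===== SOURCE B (Python) =====
-- def _count_occ(seq, p):
--     m = len(p)
--     c = 0
--     for j in range(len(seq) - m + 1):
--         if seq[j:j+m] == p:
--             c += 1
--     return c
--
-- def penalty_N3(rows):
--     n = len(rows)
--     grid = [[1 if rows[r][c] else 0 for c in range(n)] for r in range(n)]
--     cols = [[grid[r][c] for r in range(n)] for c in range(n)]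
--     lines = grid + cols
--     P1 = [1, 0, 1, 1, 1, 0, 1, 0, 0, 0, 0]
--     P2 = [0, 0, 0, 0, 1, 0, 1, 1, 1, 0, 1]
--     P3 = [0, 0, 0, 0, 1, 0, 1, 1, 1, 0, 1, 0, 0, 0, 0]
--     total = 0
--     for seq in lines:
--         total += _count_occ(seq, P2) + _count_occ(seq, P1) - _count_occ(seq, P3)
--     return 40 * total
-- ===== Notes on version B (the rewrite author's own statement) =====
-- stated objective: alternative
-- what changed: B drops A's 7-window match with separate left/right all-zero flank checks and instead counts overlapping occurrences of three fixed patterns (4-light+core, core+4-light, 4-light+core+4-light) per row/column line, combining them by inclusion-exclusion and multiplying by 40 once at the end.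
import Mathlib
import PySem

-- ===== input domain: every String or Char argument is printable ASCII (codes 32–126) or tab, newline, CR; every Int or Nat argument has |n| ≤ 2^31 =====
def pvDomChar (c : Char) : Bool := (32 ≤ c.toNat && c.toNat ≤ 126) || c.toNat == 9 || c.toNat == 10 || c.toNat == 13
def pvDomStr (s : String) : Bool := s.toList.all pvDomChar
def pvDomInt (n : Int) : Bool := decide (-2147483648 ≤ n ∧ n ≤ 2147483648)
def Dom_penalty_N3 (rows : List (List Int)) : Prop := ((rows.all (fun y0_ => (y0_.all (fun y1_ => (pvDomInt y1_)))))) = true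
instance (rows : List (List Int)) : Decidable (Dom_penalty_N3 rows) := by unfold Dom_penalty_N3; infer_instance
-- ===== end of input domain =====

-- B replaces A's 7-window match + left/right all-zero flank checks by inclusion-exclusion
-- over overlapping occurrences of three fixed patterns per line (alternative decomposition, same cost).


-- ===== PORT A =====
def pvPat : List Int := [1, 0, 1, 1, 1, 0, 1]

-- _pattern_1_1_3_1_1: literal port (row/column indexing is in range under Pre_, so pyGetD is exact there)
def pattern11311 (seq : List Int) : List Int :=
  let n : Int := seq.length
  List.foldl (fun idxs i =>
    if PySem.List.slice seq (some i) (some (i + 7)) = pvPat then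
      if (decide ((4 : Int) ≤ i) && (PySem.List.slice seq (some (i - 4)) (some i)).all (fun v => v == 0))
         || (decide (i + 7 ≤ n - 4) && (PySem.List.slice seq (some (i + 7)) (some (i + 11))).all (fun v => v == 0)) then
        idxs ++ [i]
      else idxs
    else idxs) [] (PySem.List.pyRange 0 (n - 7 + 1))

def penalty_N3 (rows : List (List Int)) : Int :=
  let n : Int := rows.length
  let score1 := List.foldl (fun score r =>
      let row := (PySem.List.pyRange 0 n).map
        (fun c => if PySem.List.pyGetD (PySem.List.pyGetD rows r []) c 0 ≠ 0 then (1 : Int) else 0)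
      score + 40 * ((pattern11311 row).length : Int)) 0 (PySem.List.pyRange 0 n)
  List.foldl (fun score c =>
      let col := (PySem.List.pyRange 0 n).map
        (fun r => if PySem.List.pyGetD (PySem.List.pyGetD rows r []) c 0 ≠ 0 then (1 : Int) else 0)
      score + 40 * ((pattern11311 col).length : Int)) score1 (PySem.List.pyRange 0 n)

-- ===== PORT B =====
def pvP1: List Int := [1, 0, 1, 1, 1, 0, 1, 0, 0, 0, 0]
def pvP2 : List Int := [0, 0, 0, 0, 1, 0, 1, 1, 1, 0, 1]
def pvP3 : List Int := [0, 0, 0, 0, 1, 0, 1, 1, 1, 0, 1, 0, 0, 0, 0]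

def countOcc (seq p : List Int) : Int :=
  List.foldl (fun c j =>
      if PySem.List.slice seq (some j) (some (j + (p.length : Int))) = p then c + 1 else c) 0
    (PySem.List.pyRange 0 ((seq.length : Int) - (p.length : Int) + 1))

def penalty_N3_alt (rows : List (List Int)) : Int :=
  let n : Int := rows.length
  let lines :=
    (PySem.List.pyRange 0 n).map (fun r => (PySem.List.pyRange 0 n).map
      (fun c => if PySem.List.pyGetD (PySem.List.pyGetD rows r []) c 0 ≠ 0 then (1 : Int) else 0)) ++
    (PySem.List.pyRange 0 n).map (fun c => (PySem.List.pyRange 0 n).map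
      (fun r => if PySem.List.pyGetD (PySem.List.pyGetD rows r []) c 0 ≠ 0 then (1 : Int) else 0))
  let total := List.foldl (fun t seq =>
      t + (countOcc seq pvP2 + countOcc seq pvP1 - countOcc seq pvP3)) 0 lines
  40 * total

-- ===== PRECONDITION & SPEC =====
-- Pre_ excludes exactly the ragged inputs (some row shorter than len(rows)) on which the Python A raises IndexError.
def Pre_penalty_N3 (rows : List (List Int)) : Prop := ∀ row ∈ rows, rows.length ≤ row.length
instance (rows : List (List Int)) : Decidable (Pre_penalty_N3 rows) := by unfold Pre_penalty_N3; infer_instance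
def pvWitness_penalty_N3 : List (List Int) := [[1, 0], [0, 1]]

def Spec_penalty_N3 (rows : List (List Int)) (out : Int) : Prop := out = penalty_N3_alt rows
instance (rows : List (List Int)) (out : Int) : Decidable (Spec_penalty_N3 rows out) := by unfold Spec_penalty_N3; infer_instance

-- ===== CLAIM (what is proved, stated in full; the proofs are below) =====
def Claim_equal_penalty_N3 : Prop := ∀ (rows : List (List Int)), Dom_penalty_N3 rows → Pre_penalty_N3 rows → Spec_penalty_N3 rows (penalty_N3 rows)

-- ===== LEMMAS AND PROOFS =====
theorem pyRange_zero_int (M : Int) :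
    PySem.List.pyRange 0 M = List.map (fun k : Nat => (k : Int)) (List.range M.toNat) := by
  by_cases h : M ≤ 0
  · rw [PySem.List.pyRange_one_eq_nil h]
    have : M.toNat = 0 := by omega
    simp [this]
  · have h1 : M = ((M.toNat : Nat) : Int) := by omega
    conv_lhs => rw [h1]
    rw [PySem.List.pyRange_zero_natCast]

theorem all0_eq_z4 (l : List Int) (h : l.length = 4) :
    (l.all (fun v => v == 0)) = decide (l = [0, 0, 0, 0]) := by
  rcases l with _ | ⟨a, _ | ⟨b, _ | ⟨c, _ | ⟨d, _ | ⟨e, t⟩⟩⟩⟩⟩ <;> simp_all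
  by_cases ha : a = 0 <;> by_cases hb : b = 0 <;> by_cases hc : c = 0 <;> by_cases hd : d = 0 <;>
    simp [ha, hb, hc, hd]

theorem take_split (s : List Int) (j a b : Nat) (p q : List Int)
    (hp : p.length = a) (hq : q.length = b) :
    ((s.drop j).take (a + b) = p ++ q) ↔ ((s.drop j).take a = p ∧ (s.drop (j + a)).take b = q) := by
  have hsplit : (s.drop j).take (a + b) = (s.drop j).take a ++ ((s.drop j).drop a).take b :=
    List.take_add
  have hdd : (s.drop j).drop a = s.drop (j + a) := by rw [List.drop_drop, Nat.add_comm]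
  rw [hsplit, hdd]
  constructor
  · intro h
    have hlen1 : ((s.drop j).take a).length ≤ a := by simp
    have hlen2 : ((s.drop (j + a)).take b).length ≤ b := by simp
    have hlen : ((s.drop j).take a).length + ((s.drop (j + a)).take b).length = a + b := by
      have := congrArg List.length h
      simpa [hp, hq] using this
    exact List.append_inj h (by omega)
  · rintro ⟨h1, h2⟩; rw [h1, h2]

theorem take_eq_len {s p : List Int} {j m : Nat} (hm : 0 < m) (h : (s.drop j).take m = p)
    (hp : p.length = m) : j + m ≤ s.length := by
  have := congrArg List.length h
  rw [List.length_take, List.length_drop, hp, Nat.min_def] at this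
  split_ifs at this <;> omega

theorem countP_or_and {α : Type} (l : List α) (p q : α → Bool) :
    l.countP (fun x => p x || q x) + l.countP (fun x => p x && q x) = l.countP p + l.countP q := by
  induction l with
  | nil => simp
  | cons x t ih =>
    by_cases hp : p x <;> by_cases hq : q x <;>
      simp [hp, hq] <;> omega

theorem countP_range_shift (Q : Nat → Bool) (d K : Nat) :
    (List.range K).countP (fun i => decide (d ≤ i) && Q (i - d)) = (List.range (K - d)).countP Q := by
  induction K with
  | zero => simp
  | succ K ih =>
    rw [List.range_succ, List.countP_append, ih]
    by_cases h : d ≤ K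
    · have h1 : K + 1 - d = (K - d) + 1 := by omega
      rw [h1, List.range_succ, List.countP_append]
      simp [h]
    · have h1 : K + 1 - d = 0 := by omega
      have h2 : K - d = 0 := by omega
      rw [h1, h2]
      simp [h]

theorem countP_range_ext (Q : Nat → Bool) (m K : Nat) (hm : m ≤ K)
    (h : ∀ i, m ≤ i → Q i = false) :
    (List.range K).countP Q = (List.range m).countP Q := by
  induction K with
  | zero =>
    have hz : m = 0 := by omega
    rw [hz]
  | succ K ih =>
    rcases Nat.eq_or_lt_of_le hm with heq | hlt
    · rw [heq]
    · have hmK : m ≤ K := by omega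
      rw [List.range_succ, List.countP_append, ih hmK]
      simp [h K hmK]

-- ---- helper predicates (proof-only) ----
def patAt (s : List Int) (i : Nat) : Bool := decide ((s.drop i).take 7 = pvPat)
def zAt (s : List Int) (i : Nat) : Bool := decide ((s.drop i).take 4 = ([0, 0, 0, 0] : List Int))
def wAt (s p : List Int) (j : Nat) : Bool := decide ((s.drop j).take p.length = p)
def aPred (s : List Int) (i : Nat) : Bool :=
  patAt s i && ((decide (4 ≤ i) && zAt s (i - 4)) || (decide (i + 11 ≤ s.length) && zAt s (i + 7)))

theorem countOcc_eq (s p : List Int) :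
    countOcc s p = ((List.range (s.length + 1 - p.length)).countP (wAt s p) : Int) := by
  unfold countOcc
  have hfun : (fun (c : Int) (j : Int) =>
      if PySem.List.slice s (some j) (some (j + (p.length : Int))) = p then c + 1 else c) =
      (fun c j => if (decide (PySem.List.slice s (some j) (some (j + (p.length : Int))) = p)) = true
        then c + 1 else c) := by
    funext c j
    by_cases h : PySem.List.slice s (some j) (some (j + (p.length : Int))) = p <;> simp [h]
  rw [hfun, PySem.List.foldl_count_if, pyRange_zero_int, List.countP_map]
  have hN : ((s.length : Int) - (p.length : Int) + 1).toNat = s.length + 1 - p.length := by omega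
  rw [hN, zero_add]
  congr 1
  apply List.countP_congr
  intro k _
  simp only [Function.comp, PySem.List.slice_natCast_add, wAt, decide_eq_true_eq]

theorem predA_eq (s : List Int) (k : Nat) :
    (decide (PySem.List.slice s (some (k : Int)) (some ((k : Int) + 7)) = pvPat) &&
     ((decide ((4 : Int) ≤ (k : Int)) &&
        (PySem.List.slice s (some ((k : Int) - 4)) (some (k : Int))).all (fun v => v == 0)) ||
      (decide ((k : Int) + 7 ≤ (s.length : Int) - 4) &&
        (PySem.List.slice s (some ((k : Int) + 7)) (some ((k : Int) + 11))).all (fun v => v == 0))))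
    = aPred s k := by
  have hsl7 : PySem.List.slice s (some (k : Int)) (some ((k : Int) + 7)) = (s.drop k).take 7 := by
    rw [show ((7 : Int)) = ((7 : Nat) : Int) from rfl, PySem.List.slice_natCast_add]
  rw [hsl7]
  by_cases hpat : (s.drop k).take 7 = pvPat
  case neg => simp [aPred, patAt, hpat]
  case pos =>
  have hk7 : k + 7 ≤ s.length := take_eq_len (by norm_num) hpat rfl
  have h4 : decide ((4 : Int) ≤ (k : Int)) = decide (4 ≤ k) := by
    rw [decide_eq_decide]; omega
  have hL : (decide ((4 : Int) ≤ (k : Int)) &&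
      (PySem.List.slice s (some ((k : Int) - 4)) (some (k : Int))).all (fun v => v == 0)) =
      (decide (4 ≤ k) && zAt s (k - 4)) := by
    by_cases h4k : 4 ≤ k
    · have hc : ((k : Int) - 4) = (((k - 4 : Nat)) : Int) := by omega
      rw [hc, h4, show ((k : Int)) = (((k : Nat)) : Int) from rfl, PySem.List.slice_natCast]
      have h44 : k - (k - 4) = 4 := by omega
      rw [h44]
      have hlen : ((s.drop (k - 4)).take 4).length = 4 := by
        rw [List.length_take, List.length_drop]; omega
      rw [all0_eq_z4 _ hlen]
      rfl
    · rw [h4]; simp [h4k]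
  have h11 : decide ((k : Int) + 7 ≤ (s.length : Int) - 4) = decide (k + 11 ≤ s.length) := by
    rw [decide_eq_decide]; omega
  have hR : (decide ((k : Int) + 7 ≤ (s.length : Int) - 4) &&
      (PySem.List.slice s (some ((k : Int) + 7)) (some ((k : Int) + 11))).all (fun v => v == 0)) =
      (decide (k + 11 ≤ s.length) && zAt s (k + 7)) := by
    rw [h11]
    by_cases h11k : k + 11 ≤ s.length
    · have hc1 : ((k : Int) + 7) = (((k + 7 : Nat)) : Int) := by omega
      have hc2 : ((k : Int) + 11) = (((k + 11 : Nat)) : Int) := by omega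
      rw [hc1, hc2, PySem.List.slice_natCast]
      have h44 : k + 11 - (k + 7) = 4 := by omega
      rw [h44]
      have hlen : ((s.drop (k + 7)).take 4).length = 4 := by
        rw [List.length_take, List.length_drop]; omega
      rw [all0_eq_z4 _ hlen]
      rfl
    · simp [h11k]
  rw [hL, hR]
  simp [aPred, patAt, hpat]

-- A's filtered count
theorem pattern11311_count (s : List Int) :
    (pattern11311 s).length = (List.range (s.length + 1 - 7)).countP (aPred s) := by
  simp only [pattern11311]
  have hfun : (fun (idxs : List Int) (i : Int) =>
      if PySem.List.slice s (some i) (some (i + 7)) = pvPat then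
        if (decide ((4 : Int) ≤ i) && (PySem.List.slice s (some (i - 4)) (some i)).all (fun v => v == 0))
           || (decide (i + 7 ≤ (s.length : Int) - 4) && (PySem.List.slice s (some (i + 7)) (some (i + 11))).all (fun v => v == 0)) then
          idxs ++ [i]
        else idxs
      else idxs) =
      (fun idxs i =>
        if (decide (PySem.List.slice s (some i) (some (i + 7)) = pvPat) &&
            ((decide ((4 : Int) ≤ i) && (PySem.List.slice s (some (i - 4)) (some i)).all (fun v => v == 0))
             || (decide (i + 7 ≤ (s.length : Int) - 4) && (PySem.List.slice s (some (i + 7)) (some (i + 11))).all (fun v => v == 0)))) = true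
          then idxs ++ [i] else idxs) := by
    funext idxs i
    by_cases h : PySem.List.slice s (some i) (some (i + 7)) = pvPat <;> simp [h]
  rw [hfun, PySem.List.foldl_append_if, pyRange_zero_int, List.filter_map]
  simp only [List.nil_append, List.length_map, ← List.countP_eq_length_filter]
  have hN : ((s.length : Int) - 7 + 1).toNat = s.length + 1 - 7 := by omega
  rw [hN]
  apply List.countP_congr
  intro k _
  simp only [Function.comp]
  rw [predA_eq]

theorem char2 (s : List Int) (j : Nat) : wAt s pvP2 j = (zAt s j && patAt s (j + 4)) := by
  have h := take_split s j 4 7 [0,0,0,0] pvPat rfl rfl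
  unfold wAt zAt patAt
  rw [show pvP2.length = 4 + 7 from rfl, show pvP2 = ([0,0,0,0] : List Int) ++ pvPat from rfl,
    ← Bool.decide_and]
  exact decide_eq_decide.mpr h

theorem char1 (s : List Int) (j : Nat) : wAt s pvP1 j = (patAt s j && zAt s (j + 7)) := by
  have h := take_split s j 7 4 pvPat [0,0,0,0] rfl rfl
  unfold wAt zAt patAt
  rw [show pvP1.length = 7 + 4 from rfl, show pvP1 = pvPat ++ ([0,0,0,0] : List Int) from rfl,
    ← Bool.decide_and]
  exact decide_eq_decide.mpr h

theorem char3 (s : List Int) (j : Nat) : wAt s pvP3 j = (zAt s j && wAt s pvP1 (j + 4)) := by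
  have h := take_split s j 4 11 [0,0,0,0] pvP1 rfl rfl
  unfold wAt zAt
  rw [show pvP3.length = 4 + 11 from rfl, show pvP1.length = 11 from rfl,
    show pvP3 = ([0,0,0,0] : List Int) ++ pvP1 from rfl, ← Bool.decide_and]
  exact decide_eq_decide.mpr h

theorem zAt_le {s : List Int} {j : Nat} (h : zAt s j = true) : j + 4 ≤ s.length :=
  take_eq_len (by norm_num) (of_decide_eq_true h) rfl

theorem w1_le {s : List Int} {j : Nat} (h : wAt s pvP1 j = true) : j + 11 ≤ s.length :=
  take_eq_len (by norm_num) (of_decide_eq_true h) rfl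

theorem w3_le {s : List Int} {j : Nat} (h : wAt s pvP3 j = true) : j + 15 ≤ s.length :=
  take_eq_len (by norm_num) (of_decide_eq_true h) rfl

theorem step1 (s : List Int) (i : Nat) :
    aPred s i = ((decide (4 ≤ i) && wAt s pvP2 (i - 4)) || wAt s pvP1 i) := by
  unfold aPred
  rw [char1, char2]
  by_cases h4 : 4 ≤ i
  · rw [Nat.sub_add_cancel h4]
    by_cases h11 : i + 11 ≤ s.length
    · simp only [h4, h11, decide_true, Bool.true_and]
      cases patAt s i <;> cases zAt s (i - 4) <;> cases zAt s (i + 7) <;> rfl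
    · have hz : zAt s (i + 7) = false := by
        cases hz : zAt s (i + 7)
        · rfl
        · exact absurd (zAt_le hz) (by omega)
      simp only [h4, h11, decide_true, decide_false, Bool.true_and, Bool.false_and, hz]
      cases patAt s i <;> cases zAt s (i - 4) <;> rfl
  · have hz : ∀ b : Bool, (decide (4 ≤ i) && b) = false := by simp [h4]
    simp only [hz, Bool.false_or]
    by_cases h11 : i + 11 ≤ s.length
    · simp [h11]
    · have hzz : zAt s (i + 7) = false := by
        cases hzz : zAt s (i + 7)
        · rfl
        · exact absurd (zAt_le hzz) (by omega)
      simp [h11, hzz]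

theorem step2 (s : List Int) (i : Nat) :
    ((decide (4 ≤ i) && wAt s pvP2 (i - 4)) && wAt s pvP1 i) =
    (decide (4 ≤ i) && wAt s pvP3 (i - 4)) := by
  rw [char3, char2]
  by_cases h4 : 4 ≤ i
  · rw [Nat.sub_add_cancel h4, char1]
    simp only [h4, decide_true, Bool.true_and]
    cases zAt s (i - 4) <;> cases patAt s i <;> cases zAt s (i + 7) <;> rfl
  · simp [h4]

theorem pattern11311_len (s : List Int) :
    ((pattern11311 s).length : Int) = countOcc s pvP2 + countOcc s pvP1 - countOcc s pvP3 := by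
  rw [pattern11311_count, countOcc_eq, countOcc_eq, countOcc_eq]
  rw [show pvP1.length = 11 from rfl, show pvP2.length = 11 from rfl, show pvP3.length = 15 from rfl]
  have hA : (List.range (s.length + 1 - 7)).countP (aPred s) =
      (List.range (s.length + 1 - 7)).countP
        (fun i => (decide (4 ≤ i) && wAt s pvP2 (i - 4)) || wAt s pvP1 i) :=
    List.countP_congr (fun i _ => by rw [step1])
  have hAnd : (List.range (s.length + 1 - 7)).countP
        (fun i => (decide (4 ≤ i) && wAt s pvP2 (i - 4)) && wAt s pvP1 i) =
      (List.range (s.length + 1 - 7)).countP (fun i => decide (4 ≤ i) && wAt s pvP3 (i - 4)) :=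
    List.countP_congr (fun i _ => by rw [step2])
  have hOr := countP_or_and (List.range (s.length + 1 - 7))
      (fun i => decide (4 ≤ i) && wAt s pvP2 (i - 4)) (wAt s pvP1)
  have hL : (List.range (s.length + 1 - 7)).countP
        (fun i => decide (4 ≤ i) && wAt s pvP2 (i - 4)) =
      (List.range (s.length + 1 - 11)).countP (wAt s pvP2) := by
    rw [countP_range_shift (wAt s pvP2) 4 (s.length + 1 - 7),
      show s.length + 1 - 7 - 4 = s.length + 1 - 11 from by omega]
  have hR : (List.range (s.length + 1 - 7)).countP (wAt s pvP1) =
      (List.range (s.length + 1 - 11)).countP (wAt s pvP1) := by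
    apply countP_range_ext _ _ _ (by omega)
    intro i hi
    cases hw : wAt s pvP1 i
    · rfl
    · exact absurd (w1_le hw) (by omega)
  have hB : (List.range (s.length + 1 - 7)).countP (fun i => decide (4 ≤ i) && wAt s pvP3 (i - 4)) =
      (List.range (s.length + 1 - 15)).countP (wAt s pvP3) := by
    rw [countP_range_shift (wAt s pvP3) 4 (s.length + 1 - 7)]
    apply countP_range_ext _ _ _ (by omega)
    intro i hi
    cases hw : wAt s pvP3 i
    · rfl
    · exact absurd (w3_le hw) (by omega)
  rw [hA] at *
  omega

theorem penalty_core (rows : List (List Int)) : penalty_N3 rows = penalty_N3_alt rows := by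
  simp only [penalty_N3, penalty_N3_alt]
  rw [PySem.List.foldl_add, PySem.List.foldl_add, PySem.List.foldl_add]
  rw [List.map_append, List.sum_append, List.map_map, List.map_map]
  simp only [Function.comp_def, zero_add]
  have hmap : ∀ (f : Int → List Int),
      List.map (fun x => 40 * ((pattern11311 (f x)).length : Int)) (PySem.List.pyRange 0 (rows.length : Int)) =
      List.map (fun x => 40 * (countOcc (f x) pvP2 + countOcc (f x) pvP1 - countOcc (f x) pvP3))
        (PySem.List.pyRange 0 (rows.length : Int)) := by
    intro f
    apply List.map_congr_left
    intro x _
    rw [pattern11311_len]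
  rw [hmap, hmap, List.sum_map_mul_left, List.sum_map_mul_left]
  ring

-- ===== VERDICT (by name: the statement is the Claim_ definition above) =====
theorem penalty_N3_spec : Claim_equal_penalty_N3 := by
  intro rows _ _
  unfold Spec_penalty_N3
  exact penalty_core rows
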